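-- pv_equiv track=rewrite | github.com/vuhatuananh/hackerrank | py-string.py | rangoli
-- ===== SOURCE A (Python) =====
-- import string
--
-- def rangoli(begin, size):
--     a = list(string.ascii_lowercase)
--     s = a[begin-1]
--     if begin==size:
--         return s
--     else:
--         for i in range(begin, size):
--             s = '-' + s + '-'
--             s = a[i] + s + a[i]
--     return s
-- ===== SOURCE B (Python) =====
-- import string
--
-- def rangoli(begin, size):
--     a = string.ascii_lowercase
--     center = a[begin - 1]
--     wings = [a[i] for i in range(begin, size)]
--     return '-'.join(wings[::-1] + [center] + wings)
-- ===== Notes on version B (the rewrite author's own statement) =====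
-- stated objective: alternative
-- what changed: B builds one half of the line (the wings) with a comprehension, mirrors it and joins with '-', instead of A's loop that grows the string symmetrically outward from the center.
import Mathlib
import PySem

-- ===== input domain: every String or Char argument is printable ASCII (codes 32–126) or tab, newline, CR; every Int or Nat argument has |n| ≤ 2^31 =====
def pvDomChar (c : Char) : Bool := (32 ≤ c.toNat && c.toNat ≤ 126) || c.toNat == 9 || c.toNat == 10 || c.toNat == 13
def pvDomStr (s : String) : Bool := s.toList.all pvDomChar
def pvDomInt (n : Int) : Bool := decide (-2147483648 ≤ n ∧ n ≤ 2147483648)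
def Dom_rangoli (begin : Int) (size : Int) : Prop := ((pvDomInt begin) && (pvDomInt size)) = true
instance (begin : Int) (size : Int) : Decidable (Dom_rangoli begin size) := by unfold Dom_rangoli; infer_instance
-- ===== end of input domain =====

-- B mirrors one list of wing letters around the center and joins with '-', instead of A's loop growing the string outward.
-- ===== PORT A =====
-- a = list(string.ascii_lowercase): a Python list of one-character strings
def pvAbcList : List String :=
  ["a","b","c","d","e","f","g","h","i","j","k","l","m","n","o","p","q","r","s","t","u","v","w","x","y","z"]

def rangoli (begin : Int) (size : Int) : String :=
  let a := pvAbcList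
  let s := PySem.List.pyGetD a (begin - 1) ""   -- a[begin-1]; in range under Pre_
  if begin = size then s
  else
    (PySem.List.pyRange begin size 1).foldl
      (fun s i =>
        let s := "-" ++ s ++ "-"
        PySem.List.pyGetD a i "" ++ s ++ PySem.List.pyGetD a i "") s

-- ===== PORT B =====
-- a[i] on the STRING a, as the one-character Python string; in range under Pre_
def pvIdxStr (s : String) (i : Int) : String :=
  ((PySem.Str.pyGet? s i).map (fun c => String.ofList [c])).getD ""

def rangoli_alt (begin : Int) (size : Int) : String :=
  let a := "abcdefghijklmnopqrstuvwxyz"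
  let center := pvIdxStr a (begin - 1)
  let wings := (PySem.List.pyRange begin size 1).map (fun i => pvIdxStr a i)
  PySem.Str.join "-" (wings.reverse ++ [center] ++ wings)

-- ===== PRECONDITION & SPEC =====
-- exactly the inputs where every index a[begin-1], a[i] (i in range(begin,size)) is in range; elsewhere A raises IndexError
def Pre_rangoli (begin : Int) (size : Int) : Prop :=
  -25 ≤ begin ∧ begin ≤ 26 ∧ (begin < size → size ≤ 26)
instance (begin : Int) (size : Int) : Decidable (Pre_rangoli begin size) := by
  unfold Pre_rangoli; infer_instance

def pvWitness_rangoli : Int × Int := (2, 5)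

def Spec_rangoli (begin : Int) (size : Int) (out : String) : Prop := out = rangoli_alt begin size
instance (begin : Int) (size : Int) (out : String) : Decidable (Spec_rangoli begin size out) := by
  unfold Spec_rangoli; infer_instance

-- ===== CLAIM (what is proved, stated in full; the proofs are below) =====
def Claim_equal_rangoli : Prop := ∀ (begin : Int) (size : Int), Dom_rangoli begin size → Pre_rangoli begin size → Spec_rangoli begin size (rangoli begin size)

-- ===== LEMMAS AND PROOFS =====

-- both alphabets index to the same one-character string, for every in-range index
lemma tok_eq : ∀ bn : Nat, bn < 52 →
    PySem.List.pyGetD pvAbcList ((bn : Int) - 26) "" =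
      pvIdxStr "abcdefghijklmnopqrstuvwxyz" ((bn : Int) - 26) := by
  decide

lemma tok_eq' (i : Int) (h1 : -26 ≤ i) (h2 : i < 26) :
    PySem.List.pyGetD pvAbcList i "" = pvIdxStr "abcdefghijklmnopqrstuvwxyz" i := by
  have := tok_eq (i + 26).toNat (by omega)
  rwa [show (((i + 26).toNat : Int)) - 26 = i by omega] at this

-- when size ≤ begin the loop body never runs and both sides are the bare center
lemma rangoli_of_ge (begin size : Int) (h : size ≤ begin) :
    rangoli begin size = PySem.List.pyGetD pvAbcList (begin - 1) "" := by
  unfold rangoli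
  by_cases hb : begin = size
  · simp [hb]
  · simp [hb, PySem.List.pyRange_one_eq_nil h]

lemma rangoli_alt_of_ge (begin size : Int) (h : size ≤ begin) :
    rangoli_alt begin size = pvIdxStr "abcdefghijklmnopqrstuvwxyz" (begin - 1) := by
  unfold rangoli_alt
  simp [PySem.List.pyRange_one_eq_nil h, PySem.Str.join]

lemma join_cons_of_ne (sep x : List Char) (l : List (List Char)) (h : l ≠ []) :
    PySem.Chars.join sep (x :: l) = x ++ sep ++ PySem.Chars.join sep l := by
  cases l with
  | nil => simp at h
  | cons y l => exact PySem.Chars.join_cons_cons ..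

lemma join_append_singleton (sep x : List Char) (l : List (List Char)) (h : l ≠ []) :
    PySem.Chars.join sep (l ++ [x]) = PySem.Chars.join sep l ++ sep ++ x := by
  induction l with
  | nil => simp at h
  | cons y l ih =>
    cases l with
    | nil => simp [PySem.Chars.join_cons_cons, PySem.Chars.join_singleton]
    | cons z l =>
      rw [List.cons_append, join_cons_of_ne _ _ _ (by simp),
          join_cons_of_ne _ _ _ (by simp), ih (by simp)]
      simp [List.append_assoc]

-- A's loop over range(lo, lo+n) starting from the center c builds exactly the mirrored join
lemma fold_join (lo : Int) (c : String) : ∀ n : Nat,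
    (PySem.List.pyRange lo (lo + n) 1).foldl
      (fun s i =>
        let s := "-" ++ s ++ "-"
        PySem.List.pyGetD pvAbcList i "" ++ s ++ PySem.List.pyGetD pvAbcList i "") c
    = PySem.Str.join "-"
        ((((PySem.List.pyRange lo (lo + n) 1).map (fun i => PySem.List.pyGetD pvAbcList i "")).reverse)
          ++ [c] ++ (PySem.List.pyRange lo (lo + n) 1).map (fun i => PySem.List.pyGetD pvAbcList i "")) := by
  intro n
  induction n with
  | zero =>
    rw [show lo + (0:Nat) = lo by omega, PySem.List.pyRange_one_eq_nil le_rfl]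
    apply String.toList_inj.mp
    simp [PySem.Str.toList_join, PySem.Chars.join_singleton]
  | succ n ih =>
    rw [show lo + ((n+1:Nat):Int) = (lo + n) + 1 by push_cast; ring,
        PySem.List.pyRange_one_succ_right (by omega)]
    rw [List.foldl_append, ih]
    apply String.toList_inj.mp
    simp only [List.map_append, List.map_cons, List.map_nil, List.reverse_append,
      List.reverse_cons, List.reverse_nil, List.nil_append, List.foldl_cons, List.foldl_nil,
      String.toList_append, PySem.Str.toList_join, List.append_assoc, List.cons_append]
    rw [join_cons_of_ne _ _ _ (by simp)]
    simp only [List.map_reverse]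
    rw [show (List.map String.toList (List.map (fun i => PySem.List.pyGetD pvAbcList i "") (PySem.List.pyRange lo (lo + (n:Int)) 1))).reverse ++ (String.toList c) :: (List.map String.toList (List.map (fun i => PySem.List.pyGetD pvAbcList i "") (PySem.List.pyRange lo (lo + (n:Int)) 1)) ++ [(PySem.List.pyGetD pvAbcList (lo + (n:Int)) "").toList])
        = ((List.map String.toList (List.map (fun i => PySem.List.pyGetD pvAbcList i "") (PySem.List.pyRange lo (lo + (n:Int)) 1))).reverse ++ (String.toList c) :: List.map String.toList (List.map (fun i => PySem.List.pyGetD pvAbcList i "") (PySem.List.pyRange lo (lo + (n:Int)) 1))) ++ [(PySem.List.pyGetD pvAbcList (lo + (n:Int)) "").toList] from by simp]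
    rw [join_append_singleton _ _ _ (by simp)]
    simp [List.append_assoc]

-- ===== VERDICT (by name: the statement is the Claim_ definition above) =====
theorem rangoli_spec : Claim_equal_rangoli := by
  intro begin size _ hpre
  obtain ⟨h1, h2, h3⟩ := hpre
  unfold Spec_rangoli
  by_cases hlt : begin < size
  · have hs : size ≤ 26 := h3 hlt
    have hcast : size = begin + (((size - begin).toNat : Nat) : Int) := by omega
    show rangoli begin size = rangoli_alt begin size
    unfold rangoli rangoli_alt
    simp only [if_neg (show ¬ begin = size by omega)]
    rw [hcast, fold_join]
    have hw : (PySem.List.pyRange begin (begin + (((size - begin).toNat : Nat) : Int)) 1).map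
          (fun i => PySem.List.pyGetD pvAbcList i "")
        = (PySem.List.pyRange begin (begin + (((size - begin).toNat : Nat) : Int)) 1).map
          (fun i => pvIdxStr "abcdefghijklmnopqrstuvwxyz" i) := by
      apply List.map_congr_left
      intro i hi
      rw [PySem.List.mem_pyRange_one] at hi
      exact tok_eq' i (by omega) (by omega)
    rw [hw, tok_eq' (begin - 1) (by omega) (by omega)]
  · rw [Int.not_lt] at hlt
    rw [rangoli_of_ge begin size hlt, rangoli_alt_of_ge begin size hlt,
        tok_eq' (begin - 1) (by omega) (by omega)]
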